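-- pv_equiv track=rewrite | github.com/noweymik/Coding-Test-Study | 프로그래머스/2/70129. 이진 변환 반복하기/이진 변환 반복하기.py | solution
-- ===== SOURCE A (Python) =====
-- def solution(s):
--     process = 0 # 이진 변환 과정 개수
--     zero_count = 0 # 변환과정에서 제거된 0의 총 개수
--
--     # 1이 될 때까지 이진 변환
--     while s != '1':
--         process += 1
--         # 0의 개수 세기
--         zero = s.count('0')
--         # 0을 제거하여 다시 s 만들기
--         s = '1' * (len(s)-zero)
--         # s의 길이(c) 2진법으로 표현한 문자열을 s에 저장하기
--         s = bin(len(s))[2:]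
--         zero_count += zero
--
--     return [process, zero_count]
-- ===== SOURCE B (Python) =====
-- def solution(s):
--     if s == '1':
--         return [0, 0]
--     # trajectory of "number of non-zero characters" values, built recursively
--     def trail(n):
--         if n == 1:
--             return [1]
--         return [n] + trail(bin(n).count('1'))
--     t = trail(len(s) - s.count('0'))
--     # each later step removes bit_length(prev) - popcount(prev) zeros; popcount(prev)
--     # is the next trail entry, recovered by pairing consecutive entries with zip
--     zeros = s.count('0') + sum(n.bit_length() - b for n, b in zip(t, t[1:]))
--     return [len(t), zeros]
-- ===== Notes on version B (the rewrite author's own statement) =====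
-- stated objective: alternative
-- what changed: B replaces A's iterative accumulator loop over rebuilt strings by a recursive construction of the whole trajectory of non-zero-character counts followed by two staged passes: the step count is the trail's length and the removed zeros are summed by zip-pairing consecutive trail entries (bit_length(prev) - next), never recomputing a popcount or a string.
import Mathlib
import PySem

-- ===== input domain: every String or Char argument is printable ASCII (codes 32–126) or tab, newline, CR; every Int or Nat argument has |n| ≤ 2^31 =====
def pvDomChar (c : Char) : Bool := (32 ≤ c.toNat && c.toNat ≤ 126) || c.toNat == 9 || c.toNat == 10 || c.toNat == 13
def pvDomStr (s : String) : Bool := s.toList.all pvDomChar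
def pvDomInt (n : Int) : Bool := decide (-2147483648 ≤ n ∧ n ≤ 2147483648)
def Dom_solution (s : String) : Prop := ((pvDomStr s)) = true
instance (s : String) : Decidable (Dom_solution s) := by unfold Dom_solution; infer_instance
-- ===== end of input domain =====

-- B builds the whole trajectory of non-zero-character counts recursively, then reads off the answer in two staged passes (length + zip-sum), instead of A's iterative accumulator over rebuilt strings.

-- ===== PORT A =====
-- bin(n)[2:] for n ≥ 1 (MSB first); hand-ported, exact for all Nat inputs
def binAux (n : Nat) : List Char :=
  if n < 2 then [if n = 1 then '1' else '0']
  else binAux (n / 2) ++ [if n % 2 = 1 then '1' else '0']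
decreasing_by exact Nat.div_lt_self (by omega) (by omega)

-- bin(n)[2:] for n ≥ 0 (Python's bin(0)[2:] = "0")
def binRep (n : Nat) : List Char := if n = 0 then ['0'] else binAux n

-- the while loop of A; fuel only makes it total (it is never exhausted on Pre_ inputs)
def solutionLoop : Nat → List Char → Int → Int → List Int
  | 0, _, p, z => [p, z]
  | f + 1, s, p, z =>
    if s = ['1'] then [p, z]
    else
      let zcount := s.count '0'
      let t := List.replicate (s.length - zcount) '1'
      let s' := binRep t.length
      solutionLoop f s' (p + 1) (z + (zcount : Int))

def solution (s : String) : List Int := solutionLoop (s.toList.length + 3) s.toList 0 0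

-- ===== PORT B =====
-- n.bit_length(); hand-ported, exact
def bitlen (n : Nat) : Nat := if n = 0 then 0 else bitlen (n / 2) + 1
decreasing_by exact Nat.div_lt_self (by omega) (by omega)

-- bin(n).count('1'); hand-ported, exact
def popc (n : Nat) : Nat := if n = 0 then 0 else popc (n / 2) + n % 2
decreasing_by exact Nat.div_lt_self (by omega) (by omega)

-- B's recursive trail(n); fuel only makes it total (never exhausted on Pre_ inputs, where the start value is ≥ 1)
def trailF : Nat → Nat → List Nat
  | 0, _ => []
  | f + 1, n => if n = 1 then [1] else n :: trailF f (popc n)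

-- sum(n.bit_length() - b for n, b in zip(t, t[1:])); t[1:] of a list is its tail (exact)
def zsum (t : List Nat) : Int :=
  (t.zip t.tail).foldl (fun a nb => a + ((bitlen nb.1 : Int) - (nb.2 : Int))) 0

def solution_alt (s : String) : List Int :=
  if s = "1" then [0, 0]
  else
    let t := trailF (s.toList.length + 2) (s.toList.length - s.toList.count '0')
    let zeros := (s.toList.count '0' : Int) + zsum t
    [(t.length : Int), zeros]

-- ===== PRECONDITION & SPEC =====
-- Pre_ excludes exactly the strings with no character other than '0' (the empty string and all-'0' strings): there A's while loop never terminates (s becomes '0' forever), so A returns on no such input.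
def Pre_solution (s : String) : Prop := s.toList.count '0' < s.toList.length
instance (s : String) : Decidable (Pre_solution s) := by unfold Pre_solution; infer_instance
def pvWitness_solution : String := "1101"
def Spec_solution (s : String) (out : List Int) : Prop := out = solution_alt s
instance (s : String) (out : List Int) : Decidable (Spec_solution s out) := by unfold Spec_solution; infer_instance

-- ===== CLAIM (what is proved, stated in full; the proofs are below) =====
def Claim_equal_solution : Prop := ∀ (s : String), Dom_solution s → Pre_solution s → Spec_solution s (solution s)

-- ===== LEMMAS AND PROOFS =====

theorem bitlen_step {n : Nat} (h : n ≠ 0) : bitlen n = bitlen (n / 2) + 1 := by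
  rw [bitlen, if_neg h]

theorem popc_step {n : Nat} (h : n ≠ 0) : popc n = popc (n / 2) + n % 2 := by
  rw [popc, if_neg h]

theorem binAux_step {n : Nat} (h : 2 ≤ n) :
    binAux n = binAux (n / 2) ++ [if n % 2 = 1 then '1' else '0'] := by
  rw [binAux, if_neg (by omega)]

theorem popc_pos {n : Nat} (h : 1 ≤ n) : 1 ≤ popc n := by
  induction n using Nat.strong_induction_on with
  | _ n ih =>
    rw [popc_step (by omega)]
    rcases Nat.lt_or_ge n 2 with h2 | h2
    · interval_cases n
      simp [popc]
    · have := ih (n / 2) (Nat.div_lt_self (by omega) (by omega)) (by omega)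
      omega

theorem popc_lt {n : Nat} (h : 2 ≤ n) : popc n < n := by
  induction n using Nat.strong_induction_on with
  | _ n ih =>
    rw [popc_step (by omega)]
    rcases Nat.lt_or_ge (n / 2) 2 with h2 | h2
    · have h1 : 1 ≤ popc (n / 2) := popc_pos (by omega)
      have h3 : popc (n / 2) ≤ n / 2 := by
        rcases Nat.lt_or_ge (n / 2) 1 with _ | _
        · omega
        · rcases Nat.eq_or_lt_of_le (show 1 ≤ n / 2 by omega) with he | _
          · rw [← he]; simp [popc]
          · omega
      omega
    · have := ih (n / 2) (Nat.div_lt_self (by omega) (by omega)) h2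
      omega

theorem binAux_len (n : Nat) (h : 1 ≤ n) : (binAux n).length = bitlen n := by
  induction n using Nat.strong_induction_on with
  | _ n ih =>
    rcases Nat.lt_or_ge n 2 with h2 | h2
    · interval_cases n
      simp [binAux, bitlen]
    · rw [binAux_step h2, bitlen_step (by omega)]
      have := ih (n / 2) (Nat.div_lt_self (by omega) (by omega)) (by omega)
      simp [this]

theorem binAux_count0 (n : Nat) (h : 1 ≤ n) :
    (binAux n).count '0' + popc n = bitlen n := by
  induction n using Nat.strong_induction_on with
  | _ n ih =>
    rcases Nat.lt_or_ge n 2 with h2 | h2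
    · interval_cases n
      simp [binAux, popc, bitlen]
    · rw [binAux_step h2, popc_step (by omega), bitlen_step (by omega)]
      have := ih (n / 2) (Nat.div_lt_self (by omega) (by omega)) (by omega)
      rcases Nat.mod_two_eq_zero_or_one n with hm | hm <;>
        simp [List.count_append, hm] <;> omega

theorem bitlen_two_le {n : Nat} (h : 2 ≤ n) : 2 ≤ bitlen n := by
  rw [bitlen_step (by omega), bitlen_step (show ¬ n / 2 = 0 by omega)]
  omega

theorem binAux_ne_one {n : Nat} (h : 2 ≤ n) : binAux n ≠ ['1'] := by
  intro he
  have h1 := binAux_len n (by omega)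
  rw [he] at h1
  have := bitlen_two_le h
  simp at h1
  omega

theorem binRep_eq_one_iff (n : Nat) (h : 1 ≤ n) : binRep n = ['1'] ↔ n = 1 := by
  constructor
  · intro he
    by_contra hn
    have h2 : 2 ≤ n := by omega
    rw [binRep, if_neg (by omega)] at he
    exact binAux_ne_one h2 he
  · intro he; subst he; rw [binRep, binAux]; simp

theorem foldl_zshift (g : Nat × Nat → Int) (l : List (Nat × Nat)) :
    ∀ c : Int, l.foldl (fun a x => a + g x) c = c + l.foldl (fun a x => a + g x) 0 := by
  induction l with
  | nil => intro c; simp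
  | cons x l ih =>
    intro c
    simp only [List.foldl_cons]
    rw [ih (c + g x), ih (0 + g x)]
    ring

theorem zsum_cons (n m : Nat) (r : List Nat) :
    zsum (n :: m :: r) = ((bitlen n : Int) - (m : Int)) + zsum (m :: r) := by
  unfold zsum
  simp only [List.tail_cons, List.zip_cons_cons, List.foldl_cons]
  rw [foldl_zshift]
  ring

theorem trail_head (f m : Nat) (hm : 1 ≤ m) (hf : 1 ≤ f) :
    ∃ r, trailF f m = m :: r := by
  rcases f with _ | f
  · omega
  · rw [trailF]
    by_cases h1 : m = 1
    · subst h1; exact ⟨[], by simp⟩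
    · exact ⟨trailF f (popc m), by simp [h1]⟩

-- key correspondence: A's loop on bin(n) computes B's trail length and zip-sum
theorem loop_eq_trail (f : Nat) : ∀ (n : Nat) (p z : Int), 1 ≤ n → n ≤ f →
    solutionLoop f (binRep n) p z =
      [p + ((trailF f n).length : Int) - 1, z + zsum (trailF f n)] := by
  induction f with
  | zero => intro n p z h hf; omega
  | succ f ih =>
    intro n p z h hf
    by_cases h1 : n = 1
    · subst h1
      rw [solutionLoop, if_pos ((binRep_eq_one_iff 1 le_rfl).mpr rfl), trailF]
      simp [zsum]
    · have h2 : 2 ≤ n := by omega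
      have hpp : 1 ≤ popc n := popc_pos h
      have hplt : popc n < n := popc_lt h2
      rw [solutionLoop, if_neg (by rw [binRep_eq_one_iff n h]; exact h1)]
      have hr : binRep n = binAux n := by rw [binRep, if_neg (by omega)]
      have hlen := binAux_len n h
      have hc0 := binAux_count0 n h
      have hkey : (binRep n).length - (binRep n).count '0' = popc n := by
        rw [hr]; omega
      simp only [List.length_replicate, hkey]
      rw [ih (popc n) (p + 1) _ hpp (by omega)]
      obtain ⟨r, hr2⟩ := trail_head f (popc n) hpp (by omega)
      rw [trailF, if_neg h1, hr2, zsum_cons]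
      have hcc : (binRep n).count '0' = bitlen n - popc n := by rw [hr]; omega
      have hple : popc n ≤ bitlen n := by omega
      simp only [List.cons.injEq, and_true, List.length_cons]
      refine ⟨by push_cast; ring, ?_⟩
      rw [hcc, Nat.cast_sub hple]
      ring

-- a string equals "1" iff its character list is ['1']
theorem toList_one (s : String) : s.toList = ['1'] ↔ s = "1" := by
  constructor
  · intro h
    have h2 := congrArg String.ofList h
    simpa using h2
  · intro h; subst h; rfl

theorem solution_spec' (s : String) (hpre : Pre_solution s) :
    solution s = solution_alt s := by
  unfold Pre_solution at hpre
  unfold solution solution_alt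
  by_cases h1 : s = "1"
  · subst h1
    rfl
  · rw [if_neg h1]
    have hne : s.toList ≠ ['1'] := fun h => h1 ((toList_one s).mp h)
    have hf : s.toList.length + 3 = (s.toList.length + 2) + 1 := by omega
    rw [hf, solutionLoop, if_neg hne]
    simp only [List.length_replicate]
    have hcle : s.toList.count '0' ≤ s.toList.length := List.count_le_length
    rw [loop_eq_trail (s.toList.length + 2) _ _ _ (by omega) (by omega)]
    simp only [List.cons.injEq, and_true]
    exact ⟨by ring, by ring⟩

-- ===== VERDICT (by name: the statement is the Claim_ definition above) =====
theorem solution_spec : Claim_equal_solution := by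
  intro s _ hpre
  exact solution_spec' s hpre
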